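-- pv_equiv track=rewrite | github.com/kramer102/Udacity-intro-to-computing-search-engine | robert_kramer_socialnetwork.py | create_data_structure
-- ===== SOURCE A (Python) =====
-- def get_next_sentence(remaining_string):
--     endpos = remaining_string.find('.') + 1
--     next_sentence = remaining_string[0:endpos]
--     return next_sentence, endpos
--
-- def parse_user(next_sentence):
--     user = next_sentence[0:next_sentence.find(' ')]
--     return user
--
-- def parse_attribute(next_sentence):
--     attribute = []
--     if "is connected to " in next_sentence:
--         con_start = next_sentence.find("is connected to ") + 15
--         next_sentence = next_sentence[con_start:]
--     else:
--         con_start = next_sentence.find("likes to play ") + 13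
--         next_sentence = next_sentence[con_start:]
--     while next_sentence.find(',') != -1:
--         con = next_sentence[1:next_sentence.find(',')]
--         attribute.append(con)
--         next_sentence = next_sentence[next_sentence.find(',') + 1:]
--     attribute.append(next_sentence[1:-1])
--     return attribute
--
-- def create_data_structure(string_input):
--     network = {}
--     while string_input.find('.') != -1:
--         next_sentence, endpos = get_next_sentence(string_input)
--         string_input = string_input[endpos:]
--         user = parse_user(next_sentence)
--         connections = parse_attribute(next_sentence)
--         next_sentence, endpos = get_next_sentence(string_input)
--         games_liked = parse_attribute(next_sentence)
--         network[user] = [connections, games_liked]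
--         string_input = string_input[endpos:]
--     return network
-- ===== SOURCE B (Python) =====
-- def _attributes(sentence):
--     k = sentence.find("is connected to ")
--     start = k + 15 if k != -1 else sentence.find("likes to play ") + 13
--     parts = sentence[start:].split(',')
--     return [p[1:] for p in parts[:-1]] + [parts[-1][1:-1]]
--
--
-- def create_data_structure(string_input):
--     sentences = [p + '.' for p in string_input.split('.')[:-1]]
--     network = {}
--     it = iter(sentences)
--     for s1 in it:
--         s2 = next(it, '')
--         user = s1[:s1.find(' ')]
--         network[user] = [_attributes(s1), _attributes(s2)]
--     return network
-- ===== Notes on version B (the rewrite author's own statement) =====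
-- stated objective: idiomatic
-- what changed: B splits the input once into the list of period-terminated sentences and walks that list two entries at a time (splitting each attribute text once on the comma separator), instead of A's while-loop that re-scans and re-slices the shrinking remainder string and peels attributes off with a nested find-comma loop.
import Mathlib
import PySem

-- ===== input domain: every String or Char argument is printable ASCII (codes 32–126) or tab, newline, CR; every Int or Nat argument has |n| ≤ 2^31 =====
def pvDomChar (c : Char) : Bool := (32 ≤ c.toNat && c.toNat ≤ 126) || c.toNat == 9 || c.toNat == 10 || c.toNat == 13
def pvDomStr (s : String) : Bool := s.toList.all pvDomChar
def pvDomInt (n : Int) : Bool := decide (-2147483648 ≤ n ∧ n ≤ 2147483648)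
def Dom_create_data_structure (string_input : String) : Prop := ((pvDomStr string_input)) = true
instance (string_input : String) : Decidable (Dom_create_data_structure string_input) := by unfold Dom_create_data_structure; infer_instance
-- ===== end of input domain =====

-- B splits the input once into the list of period-terminated sentences and walks that list two at a
-- time, instead of A's while-loop re-scanning and re-slicing the shrinking remainder string (idiomatic).


-- ===== PORT A =====

-- termination helpers for the ports (cited by decreasing_by)
theorem pvFindCharNe {c : Char} {s : List Char} (h : PySem.Chars.find s [c] ≠ -1) :
    0 ≤ PySem.Chars.find s [c] ∧ s ≠ [] := by
  have hin : [c] <:+: s := (PySem.Chars.find_ne_neg_one_iff s [c]).mp h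
  refine ⟨(PySem.Chars.find_nonneg_iff s [c]).mpr hin, ?_⟩
  rintro rfl
  simpa using hin.length_le

theorem pvSliceFromLe {α : Type} (xs : List α) (a : Int) (h0 : 0 ≤ a) :
    (PySem.List.slice xs (some a) none).length ≤ xs.length := by
  rw [PySem.List.slice_from xs h0]
  simp

theorem pvSliceFromLt {α : Type} (xs : List α) (a : Int) (h1 : 1 ≤ a) (hx : xs ≠ []) :
    (PySem.List.slice xs (some a) none).length < xs.length := by
  rw [PySem.List.slice_from xs (by omega)]
  have : 1 ≤ a.toNat := by omega
  have : 0 < xs.length := List.length_pos_iff.mpr hx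
  simp [List.length_drop]
  omega

def pvGetNextSentence (remaining : List Char) : List Char × Int :=
  let endpos := PySem.Chars.find remaining ['.'] + 1
  (PySem.List.slice remaining (some 0) (some endpos), endpos)

def pvParseUser (ns : List Char) : List Char :=
  PySem.List.slice ns (some 0) (some (PySem.Chars.find ns [' ']))

def pvParseAttrLoop (ns : List Char) (attr : List (List Char)) : List (List Char) :=
  if h : PySem.Chars.find ns [','] ≠ -1 then
    let con := PySem.List.slice ns (some 1) (some (PySem.Chars.find ns [',']))
    pvParseAttrLoop (PySem.List.slice ns (some (PySem.Chars.find ns [','] + 1)) none) (attr ++ [con])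
  else attr ++ [PySem.List.slice ns (some 1) (some (-1))]
termination_by ns.length
decreasing_by
  have hp := pvFindCharNe h
  exact pvSliceFromLt ns _ (by omega) hp.2

def pvParseAttribute (ns : List Char) : List (List Char) :=
  let rest := if PySem.Chars.isIn ("is connected to ".toList) ns then
      PySem.List.slice ns (some (PySem.Chars.find ns ("is connected to ".toList) + 15)) none
    else
      PySem.List.slice ns (some (PySem.Chars.find ns ("likes to play ".toList) + 13)) none
  pvParseAttrLoop rest []

def pvCdsLoop (s : List Char) (network : PySem.Dict (List Char) (List (List (List Char)))) :
    PySem.Dict (List Char) (List (List (List Char))) :=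
  if h : PySem.Chars.find s ['.'] ≠ -1 then
    let ns1 := (pvGetNextSentence s).1
    let s1 := PySem.List.slice s (some (pvGetNextSentence s).2) none
    let user := pvParseUser ns1
    let connections := pvParseAttribute ns1
    let ns2 := (pvGetNextSentence s1).1
    let games := pvParseAttribute ns2
    pvCdsLoop (PySem.List.slice s1 (some (pvGetNextSentence s1).2) none)
      (network.insert user [connections, games])
  else network
termination_by s.length
decreasing_by
  simp only [pvGetNextSentence]
  have hp := pvFindCharNe h
  have h1 : (PySem.List.slice s (some (PySem.Chars.find s ['.'] + 1)) none).length < s.length :=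
    pvSliceFromLt s _ (by omega) hp.2
  have h2 : (PySem.List.slice (PySem.List.slice s (some (PySem.Chars.find s ['.'] + 1)) none)
      (some (PySem.Chars.find (PySem.List.slice s (some (PySem.Chars.find s ['.'] + 1)) none) ['.'] + 1)) none).length
      ≤ (PySem.List.slice s (some (PySem.Chars.find s ['.'] + 1)) none).length :=
    pvSliceFromLe _ _ (by
      have := PySem.Chars.neg_one_le_find (PySem.List.slice s (some (PySem.Chars.find s ['.'] + 1)) none) ['.']
      omega)
  omega

def create_data_structure (string_input : String) : List (String × List (List String)) :=
  (pvCdsLoop string_input.toList PySem.Dict.empty).items.map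
    (fun p => (String.ofList p.1, p.2.map (fun a => a.map String.ofList)))

-- ===== PORT B =====

def pvAttributes (sentence : List Char) : List (List Char) :=
  let k := PySem.Chars.find sentence ("is connected to ".toList)
  let start := if k ≠ -1 then k + 15 else PySem.Chars.find sentence ("likes to play ".toList) + 13
  let parts := PySem.Chars.splitOn (PySem.List.slice sentence (some start) none) [',']
  (PySem.List.slice parts none (some (-1))).map (fun p => PySem.List.slice p (some 1) none)
    ++ [PySem.List.slice (PySem.List.pyGetD parts (-1) []) (some 1) (some (-1))]

def pvBuild (sentences : List (List Char)) (network : PySem.Dict (List Char) (List (List (List Char)))) :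
    PySem.Dict (List Char) (List (List (List Char))) :=
  match sentences with
  | [] => network
  | [s1] =>
    let user := PySem.List.slice s1 (some 0) (some (PySem.Chars.find s1 [' ']))
    network.insert user [pvAttributes s1, pvAttributes []]
  | s1 :: s2 :: rest =>
    let user := PySem.List.slice s1 (some 0) (some (PySem.Chars.find s1 [' ']))
    pvBuild rest (network.insert user [pvAttributes s1, pvAttributes s2])

def create_data_structure_alt (string_input : String) : List (String × List (List String)) :=
  let parts := PySem.Chars.splitOn string_input.toList ['.']
  let sentences := (PySem.List.slice parts none (some (-1))).map (fun p => p ++ ['.'])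
  (pvBuild sentences PySem.Dict.empty).items.map
    (fun p => (String.ofList p.1, p.2.map (fun a => a.map String.ofList)))

-- ===== PRECONDITION & SPEC =====
def Spec_create_data_structure (string_input : String) (out : List (String × List (List String))) : Prop := out = create_data_structure_alt string_input
instance (string_input : String) (out : List (String × List (List String))) : Decidable (Spec_create_data_structure string_input out) := by unfold Spec_create_data_structure; infer_instance

-- ===== CLAIM (what is proved, stated in full; the proofs are below) =====
def Claim_equal_create_data_structure : Prop := ∀ (string_input : String), Dom_create_data_structure string_input → Spec_create_data_structure string_input (create_data_structure string_input)

-- ===== LEMMAS AND PROOFS =====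

-- spec-level splitter: Python's s.split(c) for a single-char separator
def pvSp (c : Char) : List Char → List (List Char)
  | [] => [[]]
  | x :: xs => if x = c then [] :: pvSp c xs else
      match pvSp c xs with
      | [] => [[x]]
      | h :: t => (x :: h) :: t

def pvMapHd (f : List Char → List Char) : List (List Char) → List (List Char)
  | [] => []
  | h :: t => f h :: t

theorem pvSp_ne_nil (c : Char) (s : List Char) : pvSp c s ≠ [] := by
  induction s with
  | nil => simp [pvSp]
  | cons x xs ih =>
    simp only [pvSp]
    split
    · simp
    · cases h : pvSp c xs <;> simp

theorem pvGo (c : Char) (l : List Char) : ∀ (fuel : Nat) (cur : List Char) (acc : List (List Char)), l.length < fuel →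
    PySem.Chars.splitOn.go [c] fuel l cur acc = acc.reverse ++ pvMapHd (cur.reverse ++ ·) (pvSp c l) := by
  induction l with
  | nil =>
    intro fuel cur acc h
    obtain ⟨f, rfl⟩ : ∃ f, fuel = f + 1 := ⟨fuel - 1, by omega⟩
    simp [PySem.Chars.splitOn.go, pvSp, pvMapHd]
  | cons x xs ih =>
    intro fuel cur acc h
    obtain ⟨f, rfl⟩ : ∃ f, fuel = f + 1 := ⟨fuel - 1, by omega⟩
    rw [PySem.Chars.splitOn.go]
    by_cases hx : x = c
    · subst hx
      have hpre : List.isPrefixOf [x] (x :: xs) = true := by simp [List.isPrefixOf]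
      rw [if_pos hpre]
      simp only [List.length_singleton, List.drop_one, List.tail_cons]
      rw [ih f [] ((cur.reverse) :: acc) (by simpa using h)]
      simp only [pvSp, pvMapHd]
      cases hs : pvSp x xs with
      | nil => exact absurd hs (pvSp_ne_nil x xs)
      | cons hd tl => simp
    · have hpre : List.isPrefixOf [c] (x :: xs) = false := by
        simp [List.isPrefixOf]; exact fun hc => absurd hc.symm hx
      rw [if_neg (by simp [hpre])]
      rw [ih f (x :: cur) acc (by simpa using h)]
      simp only [pvSp, if_neg hx]
      cases hs : pvSp c xs with
      | nil => exact absurd hs (pvSp_ne_nil c xs)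
      | cons hd tl => simp [pvMapHd]

theorem pvSplitOn_eq_sp (c : Char) (s : List Char) :
    PySem.Chars.splitOn s [c] = pvSp c s := by
  rw [PySem.Chars.splitOn, pvGo c s (s.length + 1) [] [] (by omega)]
  cases hs : pvSp c s with
  | nil => exact absurd hs (pvSp_ne_nil c s)
  | cons hd tl => simp [pvMapHd]

theorem pvSp_no_occ {c : Char} {s : List Char} (h : c ∉ s) : pvSp c s = [s] := by
  induction s with
  | nil => rfl
  | cons x xs ih =>
    simp only [List.mem_cons, not_or] at h
    simp only [pvSp, ih h.2]
    rw [if_neg (fun hxc => h.1 hxc.symm)]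

theorem pvSp_occ {c : Char} {u : List Char} (v : List Char) (h : c ∉ u) :
    pvSp c (u ++ c :: v) = u :: pvSp c v := by
  induction u with
  | nil => simp [pvSp]
  | cons x u' ih =>
    simp only [List.mem_cons, not_or] at h
    simp only [List.cons_append, pvSp, ih h.2]
    rw [if_neg (fun hxc => h.1 hxc.symm)]

theorem pvNotMem_of_find_eq_neg_one {c : Char} {s : List Char}
    (h : PySem.Chars.find s [c] = -1) : c ∉ s := by
  intro hc
  exact absurd h (PySem.Chars.find_ne_neg_one_iff s [c] |>.mpr ((List.singleton_infix_iff c s).mpr hc))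

theorem pvFind_decomp {c : Char} {s : List Char} (h : PySem.Chars.find s [c] ≠ -1) :
    ∃ u v, s = u ++ c :: v ∧ c ∉ u ∧ PySem.Chars.find s [c] = u.length := by
  have hin : [c] <:+: s := (PySem.Chars.find_ne_neg_one_iff s [c]).mp h
  have h0 : 0 ≤ PySem.Chars.find s [c] := (PySem.Chars.find_nonneg_iff s [c]).mpr hin
  obtain ⟨hpre, hmin⟩ := PySem.Chars.find_spec h0
  set p := (PySem.Chars.find s [c]).toNat with hp
  obtain ⟨v, hv⟩ : ∃ v, s.drop p = c :: v := by
    rcases hpre with ⟨t, ht⟩; exact ⟨t, ht.symm⟩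
  have hplen : p < s.length := by
    by_contra hna
    rw [List.drop_eq_nil_of_le (by omega)] at hv; simp at hv
  refine ⟨s.take p, v, ?_, ?_, ?_⟩
  · conv_lhs => rw [← List.take_append_drop p s]
    rw [hv]
  · intro hc
    obtain ⟨i, hi, hci⟩ := List.getElem_of_mem hc
    have hip : i < p := by simp at hi; omega
    refine hmin i hip ⟨s.drop (i+1), ?_⟩
    have hlt : i < s.length := by omega
    have hdi : s.drop i = c :: s.drop (i + 1) := by
      rw [List.drop_eq_getElem_cons hlt]
      have : (s.take p)[i] = s[i]'hlt := List.getElem_take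
      rw [this] at hci
      rw [hci]
    simpa using hdi.symm
  · rw [List.length_take, min_eq_left (by omega)]
    omega

-- the attribute list produced from the already-split parts
def pvAttrTail : List (List Char) → List (List Char)
  | [] => []
  | [p] => [p.tail.dropLast]
  | p :: rest => p.tail :: pvAttrTail rest

theorem pvAttrTail_cons (u : List Char) (L : List (List Char)) (h : L ≠ []) :
    pvAttrTail (u :: L) = u.tail :: pvAttrTail L := by
  cases L with
  | nil => exact absurd rfl h
  | cons a as => rfl

theorem pvSlice_one_neg_one (xs : List Char) :
    PySem.List.slice xs (some 1) (some (-1)) = xs.tail.dropLast := by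
  cases xs with
  | nil => rfl
  | cons x t =>
    simp [PySem.List.slice, PySem.List.clampIdx, List.dropLast_eq_take]
    split <;> omega

theorem pvSlice_one_ulen (u : List Char) (c : Char) (v : List Char) :
    PySem.List.slice (u ++ c :: v) (some 1) (some (u.length : Int)) = u.tail := by
  rw [PySem.List.slice_toNat _ (by omega) (by omega)]
  cases u with
  | nil => simp
  | cons a u' => simp

theorem pvSlice_drop (u : List Char) (c : Char) (v : List Char) :
    PySem.List.slice (u ++ c :: v) (some ((u.length : Int) + 1)) none = v := by
  rw [PySem.List.slice_from _ (by omega)]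
  have : ((u.length : Int) + 1).toNat = u.length + 1 := by omega
  rw [this, List.drop_append]
  simp

theorem pvSlice_take (u : List Char) (c : Char) (v : List Char) :
    PySem.List.slice (u ++ c :: v) (some 0) (some ((u.length : Int) + 1)) = u ++ [c] := by
  rw [PySem.List.slice_zero_start, PySem.List.slice_to _ (by omega)]
  have : ((u.length : Int) + 1).toNat = u.length + 1 := by omega
  rw [this, List.take_append]
  simp

theorem pvParseAttrLoopFuel (n : Nat) : ∀ (ns : List Char) (attr : List (List Char)),
    ns.length ≤ n → pvParseAttrLoop ns attr = attr ++ pvAttrTail (pvSp ',' ns) := by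
  induction n with
  | zero =>
    intro ns attr hn
    have hns : ns = [] := by cases ns <;> simp_all
    subst hns
    rw [pvParseAttrLoop]
    have hf : PySem.Chars.find [] [','] = -1 := by
      by_contra h; exact (pvFindCharNe h).2 rfl
    rw [dif_neg (by simpa using hf)]
    simp [pvSp, pvAttrTail, pvSlice_one_neg_one]
  | succ n ih =>
    intro ns attr hn
    rw [pvParseAttrLoop]
    by_cases hf : PySem.Chars.find ns [','] = -1
    · rw [dif_neg (by simpa using hf)]
      rw [pvSp_no_occ (pvNotMem_of_find_eq_neg_one hf)]
      simp [pvAttrTail, pvSlice_one_neg_one]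
    · rw [dif_pos hf]
      obtain ⟨u, v, rfl, hu, hfind⟩ := pvFind_decomp hf
      rw [hfind, pvSlice_one_ulen, pvSlice_drop]
      rw [ih v (attr ++ [u.tail]) (by simp at hn ⊢; omega)]
      rw [pvSp_occ v hu, pvAttrTail_cons u _ (pvSp_ne_nil ',' v)]
      simp

theorem pvAttrTail_of_parts (L : List (List Char)) (h : L ≠ []) :
    (PySem.List.slice L none (some (-1))).map (fun p => PySem.List.slice p (some 1) none)
      ++ [PySem.List.slice (PySem.List.pyGetD L (-1) []) (some 1) (some (-1))] = pvAttrTail L := by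
  induction L with
  | nil => exact absurd rfl h
  | cons p rest ih =>
    cases rest with
    | nil =>
      simp [PySem.List.slice_to_neg_one, pvSlice_one_neg_one, pvAttrTail,
        PySem.List.pyGetD_neg_one [p] [] (by simp)]
    | cons q rest' =>
      rw [pvAttrTail_cons p _ (by simp)]
      rw [← ih (by simp)]
      rw [PySem.List.slice_to_neg_one, PySem.List.slice_to_neg_one]
      rw [PySem.List.pyGetD_neg_one (p :: q :: rest') [] (by simp),
          PySem.List.pyGetD_neg_one (q :: rest') [] (by simp)]
      rw [List.getLast_cons (by simp)]
      simp [PySem.List.slice_from_one]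

theorem pvAttributes_eq_parse (ns : List Char) :
    pvParseAttribute ns = pvAttributes ns := by
  have hloop : ∀ rest : List Char,
      pvParseAttrLoop rest [] = pvAttrTail (pvSp ',' rest) := fun rest => by
    simpa using pvParseAttrLoopFuel rest.length rest [] le_rfl
  have hparts : ∀ rest : List Char,
      (PySem.List.slice (PySem.Chars.splitOn rest [',']) none (some (-1))).map
          (fun p => PySem.List.slice p (some 1) none)
        ++ [PySem.List.slice (PySem.List.pyGetD (PySem.Chars.splitOn rest [',']) (-1) [])
            (some 1) (some (-1))] = pvAttrTail (pvSp ',' rest) := fun rest => by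
    rw [pvSplitOn_eq_sp]
    exact pvAttrTail_of_parts _ (pvSp_ne_nil ',' rest)
  unfold pvParseAttribute pvAttributes
  generalize "is connected to ".toList = K1
  generalize "likes to play ".toList = K2
  simp only []
  by_cases hk : PySem.Chars.find ns K1 = -1
  · rw [if_neg (by simp [PySem.Chars.isIn, hk]), if_neg (by simp [hk])]
    rw [hloop, hparts]
  · rw [if_pos (by simp [PySem.Chars.isIn, hk]), if_pos (by simp [hk])]
    rw [hloop, hparts]

theorem pvMain (n : Nat) (s : List Char) (d : PySem.Dict (List Char) (List (List (List Char))))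
    (hn : s.length ≤ n) :
    pvCdsLoop s d = pvBuild ((pvSp '.' s).dropLast.map (· ++ ['.'])) d := by
  induction n generalizing s d with
  | zero =>
    have hs : s = [] := by cases s <;> simp_all
    subst hs
    rw [pvCdsLoop]
    have hf : PySem.Chars.find [] ['.'] = -1 := by
      by_contra h; exact (pvFindCharNe h).2 rfl
    rw [dif_neg (by simpa using hf)]
    simp [pvSp, pvBuild]
  | succ n ih =>
    rw [pvCdsLoop]
    by_cases hf : PySem.Chars.find s ['.'] = -1
    · rw [dif_neg (by simpa using hf)]
      rw [pvSp_no_occ (pvNotMem_of_find_eq_neg_one hf)]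
      simp [pvBuild]
    · rw [dif_pos hf]
      obtain ⟨u, v, rfl, hu, hfind⟩ := pvFind_decomp hf
      simp only [pvGetNextSentence, hfind]
      rw [pvSlice_take, pvSlice_drop]
      by_cases hfv : PySem.Chars.find v ['.'] = -1
      · have hnv : '.' ∉ v := pvNotMem_of_find_eq_neg_one hfv
        rw [hfv]
        norm_num
        rw [show PySem.List.slice v none (some 0) = [] from by
          rw [PySem.List.slice_to v (by norm_num)]; simp]
        rw [pvCdsLoop, dif_neg (by simpa using hfv)]
        rw [pvSp_occ v hu, pvSp_no_occ hnv]
        simp [pvBuild, pvParseUser, pvAttributes_eq_parse]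
      · obtain ⟨w, z, rfl, hw, hfindv⟩ := pvFind_decomp hfv
        rw [hfindv, pvSlice_take, pvSlice_drop]
        rw [ih z _ (by simp at hn ⊢; omega)]
        rw [pvSp_occ (w ++ '.' :: z) hu, pvSp_occ z hw]
        have hnz := pvSp_ne_nil '.' z
        simp [pvBuild, pvParseUser, pvAttributes_eq_parse,
          List.dropLast_cons_of_ne_nil, hnz]

-- ===== VERDICT (by name: the statement is the Claim_ definition above) =====
theorem create_data_structure_spec : Claim_equal_create_data_structure := by
  intro s _
  unfold Spec_create_data_structure create_data_structure create_data_structure_alt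
  rw [pvMain s.toList.length s.toList PySem.Dict.empty le_rfl]
  simp only [PySem.List.slice_to_neg_one, pvSplitOn_eq_sp]
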